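-- pv_equiv track=rewrite | github.com/Amitmane699/launchcv | backend/services/resume_parser.py | get_section_range
-- ===== SOURCE A (Python) =====
-- from typing import Dict, Any, List
--
-- SECTION_KEYWORDS = {
--     "summary":        ["summary", "profile", "objective", "about me"],
--     "experience":     ["experience", "work experience", "employment", "professional experience", "work history"],
--     "education":      ["education", "academic", "qualifications"],
--     "skills":         ["skills", "technical skills", "core competencies", "technologies"],
--     "projects":       ["projects", "personal projects", "key projects"],
--     "certifications": ["certifications", "certificates", "licenses"],
--     "languages":      ["languages"],
--     "hobbies":        ["hobbies", "interests"],
-- }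
--
-- def find_section(lines: List[str], section_keys: List[str]) -> int:
--     """Return index of the line that matches one of the section keywords (heading-like)."""
--     for i, ln in enumerate(lines):
--         low = ln.lower().strip(" :•·")
--         if len(low) > 40:
--             continue
--         for kw in section_keys:
--             if low == kw or low.startswith(kw + ":") or low == kw.upper():
--                 return i
--     return -1
--
-- def get_section_range(lines: List[str], section_key: str) -> (int, int):
--     """Return (start, end) inclusive of a section by key name."""
--     start = find_section(lines, SECTION_KEYWORDS.get(section_key, []))
--     if start == -1:
--         return -1, -1
--     # Find next known section after `start`
--     end = len(lines)
--     for other_key, kws in SECTION_KEYWORDS.items():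
--         if other_key == section_key:
--             continue
--         idx = find_section(lines[start + 1:], kws)
--         if idx != -1:
--             end = min(end, start + 1 + idx)
--     return start, end
-- ===== SOURCE B (Python) =====
-- SECTION_KEYWORDS = {
--     "summary":        ["summary", "profile", "objective", "about me"],
--     "experience":     ["experience", "work experience", "employment", "professional experience", "work history"],
--     "education":      ["education", "academic", "qualifications"],
--     "skills":         ["skills", "technical skills", "core competencies", "technologies"],
--     "projects":       ["projects", "personal projects", "key projects"],
--     "certifications": ["certifications", "certificates", "licenses"],
--     "languages":      ["languages"],
--     "hobbies":        ["hobbies", "interests"],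
-- }
--
-- def _matches(low, kws):
--     return any(low == kw or low.startswith(kw + ":") or low == kw.upper() for kw in kws)
--
-- def get_section_range(lines, section_key):
--     own = SECTION_KEYWORDS.get(section_key, [])
--     others = [kw for k, kws in SECTION_KEYWORDS.items() if k != section_key for kw in kws]
--     start = -1
--     for i, ln in enumerate(lines):
--         low = ln.lower().strip(" :\u2022\u00b7")
--         if len(low) > 40:
--             continue
--         if start == -1:
--             if _matches(low, own):
--                 start = i
--         elif _matches(low, others):
--             return start, i
--     return (start, len(lines)) if start != -1 else (-1, -1)
-- ===== Notes on version B (the rewrite author's own statement) =====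
-- stated objective: alternative
-- what changed: A calls find_section once per other section (one scan of a sliced tail per other section); B makes a single left-to-right pass that finds the start line and then returns at the first later line matching any other section's keywords.
import Mathlib
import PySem

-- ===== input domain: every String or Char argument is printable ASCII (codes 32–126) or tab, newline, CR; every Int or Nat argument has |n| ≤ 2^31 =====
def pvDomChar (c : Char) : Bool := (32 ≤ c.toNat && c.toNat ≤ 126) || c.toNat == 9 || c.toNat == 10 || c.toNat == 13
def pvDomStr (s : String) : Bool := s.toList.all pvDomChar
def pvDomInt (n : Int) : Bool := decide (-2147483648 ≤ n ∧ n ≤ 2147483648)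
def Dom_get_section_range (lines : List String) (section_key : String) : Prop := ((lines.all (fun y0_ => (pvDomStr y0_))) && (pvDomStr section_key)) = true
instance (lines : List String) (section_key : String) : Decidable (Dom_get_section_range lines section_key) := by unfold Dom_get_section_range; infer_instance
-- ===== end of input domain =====

-- B replaces A's one find_section scan per other section (up to 7 extra passes over the
-- tail) by a single left-to-right pass that finds the start and then the first later line
-- matching any other section's keywords; same return value everywhere.

-- ===== PORT A =====
-- the module constant SECTION_KEYWORDS (shared by both programs)
def pvKeywords : PySem.Dict String (List String) := PySem.Dict.mk [
  ("summary",        ["summary", "profile", "objective", "about me"]),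
  ("experience",     ["experience", "work experience", "employment", "professional experience", "work history"]),
  ("education",      ["education", "academic", "qualifications"]),
  ("skills",         ["skills", "technical skills", "core competencies", "technologies"]),
  ("projects",       ["projects", "personal projects", "key projects"]),
  ("certifications", ["certifications", "certificates", "licenses"]),
  ("languages",      ["languages"]),
  ("hobbies",        ["hobbies", "interests"])]

-- the keyword test shared by both Pythons (A inlines it, B calls it _matches)
def pvMatches (low : String) (kws : List String) : Bool :=
  kws.any (fun kw => low == kw || PySem.Str.startswith low (kw ++ ":") || low == PySem.Str.upper kw)

-- A's find_section: 'for i, ln in enumerate(lines): …' as structural recursion with counter i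
def findSectionGo (keys : List String) : List String → Int → Int
  | [], _ => -1
  | ln :: rest, i =>
    let low := PySem.Str.stripChars (PySem.Str.lower ln) " :•·"
    if 40 < PySem.Str.len low then findSectionGo keys rest (i + 1)
    else if pvMatches low keys then i
    else findSectionGo keys rest (i + 1)

def find_section (lines : List String) (section_keys : List String) : Int :=
  findSectionGo section_keys lines 0

def get_section_range (lines : List String) (section_key : String) : Int × Int :=
  let start := find_section lines (pvKeywords.getD section_key [])
  if start = -1 then (-1, -1)
  else
    let sub := PySem.List.slice lines (some (start + 1)) none
    let endv := pvKeywords.items.foldl (fun e kv =>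
      if kv.1 == section_key then e
      else
        let idx := find_section sub kv.2
        if idx ≠ -1 then min e (start + 1 + idx) else e) (PySem.List.len lines)
    (start, endv)

-- ===== PORT B =====
-- Source B's single loop: start=None phase looks for `own`, afterwards the first match of `others` ends the pass
def bGo (own others : List String) (total : Int) : List String → Int → Option Int → Int × Int
  | [], _, start =>
    match start with
    | some s => (s, total)
    | none => (-1, -1)
  | ln :: rest, i, start =>
    let low := PySem.Str.stripChars (PySem.Str.lower ln) " :•·"
    if 40 < PySem.Str.len low then bGo own others total rest (i + 1) start
    else
      match start with
      | none =>
        if pvMatches low own then bGo own others total rest (i + 1) (some i)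
        else bGo own others total rest (i + 1) none
      | some s => if pvMatches low others then (s, i) else bGo own others total rest (i + 1) (some s)

def get_section_range_alt (lines : List String) (section_key : String) : Int × Int :=
  let own := pvKeywords.getD section_key []
  let others := (pvKeywords.items.filter (fun kv => kv.1 != section_key)).flatMap (fun kv => kv.2)
  bGo own others (PySem.List.len lines) lines 0 none

-- ===== PRECONDITION & SPEC =====
def Spec_get_section_range (lines : List String) (section_key : String) (out : Int × Int) : Prop := out = get_section_range_alt lines section_key
instance (lines : List String) (section_key : String) (out : Int × Int) : Decidable (Spec_get_section_range lines section_key out) := by unfold Spec_get_section_range; infer_instance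

-- ===== CLAIM (what is proved, stated in full; the proofs are below) =====
def Claim_equal_get_section_range : Prop := ∀ (lines : List String) (section_key : String), Dom_get_section_range lines section_key → Spec_get_section_range lines section_key (get_section_range lines section_key)

-- ===== LEMMAS AND PROOFS =====

-- the per-line predicate both programs evaluate (length guard folded in)
def lineP (kws : List String) (ln : String) : Bool :=
  let low := PySem.Str.stripChars (PySem.Str.lower ln) " :•·"
  !(40 < PySem.Str.len low : Bool) && pvMatches low kws

theorem lineP_long (kws : List String) (ln : String)
    (hg : 40 < PySem.Str.len (PySem.Str.stripChars (PySem.Str.lower ln) " :•·")) :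
    lineP kws ln = false := by
  unfold lineP
  show (!decide (40 < PySem.Str.len (PySem.Str.stripChars (PySem.Str.lower ln) " :•·"))
      && pvMatches (PySem.Str.stripChars (PySem.Str.lower ln) " :•·") kws) = false
  rw [decide_eq_true hg]
  simp

theorem lineP_short (kws : List String) (ln : String)
    (hg : ¬ 40 < PySem.Str.len (PySem.Str.stripChars (PySem.Str.lower ln) " :•·")) :
    lineP kws ln = pvMatches (PySem.Str.stripChars (PySem.Str.lower ln) " :•·") kws := by
  unfold lineP
  show (!decide (40 < PySem.Str.len (PySem.Str.stripChars (PySem.Str.lower ln) " :•·"))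
      && pvMatches (PySem.Str.stripChars (PySem.Str.lower ln) " :•·") kws)
      = pvMatches (PySem.Str.stripChars (PySem.Str.lower ln) " :•·") kws
  rw [decide_eq_false hg]
  simp

-- first index in `sub` satisfying q, `sub.length` if none
def gIdx (sub : List String) (q : String → Bool) : Nat := (sub.findIdx? q).getD sub.length

theorem gIdx_le (sub : List String) (q : String → Bool) : gIdx sub q ≤ sub.length := by
  unfold gIdx
  cases h : sub.findIdx? q with
  | none => simp
  | some k => simpa using le_of_lt (List.findIdx?_eq_some_iff_findIdx_eq.mp h).1

theorem gIdx_cons (q : String → Bool) (x : String) (t : List String) :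
    gIdx (x :: t) q = if q x then 0 else gIdx t q + 1 := by
  by_cases h : q x = true
  · simp [gIdx, List.findIdx?_cons, h]
  · simp only [gIdx, List.findIdx?_cons, h, Bool.false_eq_true, if_false]
    cases t.findIdx? q <;> simp

theorem gIdx_or (sub : List String) (p q : String → Bool) :
    gIdx sub (fun x => p x || q x) = min (gIdx sub p) (gIdx sub q) := by
  induction sub with
  | nil => simp [gIdx]
  | cons x t ih =>
    rw [gIdx_cons, gIdx_cons, gIdx_cons]
    by_cases hp : p x = true <;> by_cases hq : q x = true <;> simp [hp, hq, ih] <;> omega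

theorem findSectionGo_eq (keys : List String) : ∀ (lines : List String) (i : Int),
    findSectionGo keys lines i =
      match lines.findIdx? (lineP keys) with
      | none => -1
      | some k => i + (k : Int) := by
  intro lines
  induction lines with
  | nil => intro i; simp [findSectionGo]
  | cons ln rest ih =>
    intro i
    simp only [findSectionGo, List.findIdx?_cons]
    by_cases hg : 40 < PySem.Str.len (PySem.Str.stripChars (PySem.Str.lower ln) " :•·")
    · have hP : lineP keys ln = false := lineP_long _ _ hg
      rw [if_pos hg, ih, hP]
      cases h : rest.findIdx? (lineP keys) <;> simp <;> push_cast <;> ring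
    · rw [if_neg hg]
      by_cases hm : pvMatches (PySem.Str.stripChars (PySem.Str.lower ln) " :•·") keys = true
      · have hP : lineP keys ln = true := by rw [lineP_short _ _ hg]; exact hm
        simp [hm, hP]
      · have hP : lineP keys ln = false := by rw [lineP_short _ _ hg]; simpa using hm
        simp only [hm, if_false, hP, ih]
        cases h : rest.findIdx? (lineP keys) <;> simp <;> push_cast <;> ring

-- A's inner loop over the other sections, as a min over gIdx
theorem foldA_eq (sub : List String) (c : Int) (key : String) :
    ∀ (prs : List (String × List String)) (n : Nat), n ≤ sub.length →
    prs.foldl (fun e kv =>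
      if kv.1 == key then e
      else
        let idx := find_section sub kv.2
        if idx ≠ -1 then min e (c + idx) else e) (c + (n : Int))
    = c + (min n (gIdx sub (fun ln => (prs.filter (fun kv => kv.1 != key)).any (fun kv => lineP kv.2 ln))) : Nat) := by
  intro prs
  induction prs with
  | nil =>
    intro n hn
    have h0 : List.findIdx? (fun _ : String => false) sub = none := by
      rw [List.findIdx?_eq_none_iff]; intro x _; rfl
    simp [gIdx, h0, Nat.min_eq_left hn]
  | cons kv rest ih =>
    intro n hn
    simp only [List.foldl_cons]
    by_cases hk : (kv.1 == key) = true
    · have hk' : kv.1 = key := by simpa using hk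
      have hQ : (fun ln => (List.filter (fun kv => kv.1 != key) (kv :: rest)).any fun kv => lineP kv.2 ln)
          = (fun ln => (List.filter (fun kv => kv.1 != key) rest).any fun kv => lineP kv.2 ln) := by
        funext ln
        rw [List.filter_cons, if_neg (by simp [hk'] : ¬ ((kv.1 != key) = true))]
      rw [if_pos hk, ih n hn, hQ]
    · have hk' : ¬ kv.1 = key := by simpa using hk
      have hQ : (fun ln => (List.filter (fun kv => kv.1 != key) (kv :: rest)).any fun kv => lineP kv.2 ln)
          = (fun ln => lineP kv.2 ln || (List.filter (fun kv => kv.1 != key) rest).any fun kv => lineP kv.2 ln) := by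
        funext ln
        rw [List.filter_cons, if_pos (by simp [hk'] : ((kv.1 != key) = true)), List.any_cons]
      have hOr : gIdx sub (fun ln => (List.filter (fun kv => kv.1 != key) (kv :: rest)).any fun kv => lineP kv.2 ln)
          = min (gIdx sub (lineP kv.2))
              (gIdx sub (fun ln => (List.filter (fun kv => kv.1 != key) rest).any fun kv => lineP kv.2 ln)) := by
        rw [hQ]; exact gIdx_or sub _ _
      have hle := gIdx_le sub (fun ln => (List.filter (fun kv => kv.1 != key) rest).any fun kv => lineP kv.2 ln)
      cases h : sub.findIdx? (lineP kv.2) with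
      | none =>
        have hf0 : find_section sub kv.2 = -1 := by rw [find_section, findSectionGo_eq, h]
        have hg : gIdx sub (lineP kv.2) = sub.length := by simp [gIdx, h]
        have hstep : (if kv.1 == key then (c + (n : Int))
            else
              let idx := find_section sub kv.2
              if idx ≠ -1 then min (c + (n : Int)) (c + idx) else (c + (n : Int)))
            = c + (n : Int) := by
          rw [if_neg hk, hf0]; simp
        rw [hstep, ih n hn, hOr, hg]
        congr 2
        omega
      | some k =>
        have hfk : find_section sub kv.2 = (k : Int) := by
          rw [find_section, findSectionGo_eq, h]; simp
        have hg : gIdx sub (lineP kv.2) = k := by simp [gIdx, h]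
        have hkl : k < sub.length := (List.findIdx?_eq_some_iff_findIdx_eq.mp h).1
        have hstep : (if kv.1 == key then (c + (n : Int))
            else
              let idx := find_section sub kv.2
              if idx ≠ -1 then min (c + (n : Int)) (c + idx) else (c + (n : Int)))
            = c + ((min n k : Nat) : Int) := by
          rw [if_neg hk, hfk]
          have hne : ((k : Int)) ≠ -1 := by omega
          show (if (k : Int) ≠ -1 then min (c + (n : Int)) (c + (k : Int)) else (c + (n : Int)))
              = c + ((min n k : Nat) : Int)
          rw [if_pos hne]
          push_cast
          omega
        rw [hstep, ih (min n k) (by omega), hOr, hg]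
        congr 2
        omega

theorem bGo_some (own others : List String) (total : Int) :
    ∀ (sub : List String) (i : Int) (s : Int),
    bGo own others total sub i (some s) =
      match sub.findIdx? (lineP others) with
      | none => (s, total)
      | some j => (s, i + (j : Int)) := by
  intro sub
  induction sub with
  | nil => intro i s; simp [bGo]
  | cons ln rest ih =>
    intro i s
    simp only [bGo, List.findIdx?_cons]
    by_cases hg : 40 < PySem.Str.len (PySem.Str.stripChars (PySem.Str.lower ln) " :•·")
    · have hP : lineP others ln = false := lineP_long _ _ hg
      rw [if_pos hg, ih, hP]
      cases h : rest.findIdx? (lineP others) <;> simp <;> push_cast <;> ring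
    · rw [if_neg hg]
      by_cases hm : pvMatches (PySem.Str.stripChars (PySem.Str.lower ln) " :•·") others = true
      · have hP : lineP others ln = true := by rw [lineP_short _ _ hg]; exact hm
        simp [hm, hP]
      · have hP : lineP others ln = false := by rw [lineP_short _ _ hg]; simpa using hm
        simp only [hm, if_false, hP, ih]
        cases h : rest.findIdx? (lineP others) <;> simp <;> push_cast <;> ring

theorem bGo_none (own others : List String) (total : Int) :
    ∀ (lines : List String) (i : Int),
    bGo own others total lines i none =
      match lines.findIdx? (lineP own) with
      | none => (-1, -1)
      | some k => bGo own others total (lines.drop (k + 1)) (i + (k : Int) + 1) (some (i + (k : Int))) := by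
  intro lines
  induction lines with
  | nil => intro i; simp [bGo]
  | cons ln rest ih =>
    intro i
    simp only [bGo, List.findIdx?_cons]
    by_cases hg : 40 < PySem.Str.len (PySem.Str.stripChars (PySem.Str.lower ln) " :•·")
    · have hP : lineP own ln = false := lineP_long _ _ hg
      rw [if_pos hg, ih, hP]
      cases h : rest.findIdx? (lineP own) with
      | none => simp
      | some k =>
        simp only [Option.map_some]
        have : (↑(k + 1) : Int) = (k : Int) + 1 := by push_cast; ring
        simp [List.drop_succ_cons, this]
        ring_nf
    · rw [if_neg hg]
      by_cases hm : pvMatches (PySem.Str.stripChars (PySem.Str.lower ln) " :•·") own = true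
      · have hP : lineP own ln = true := by rw [lineP_short _ _ hg]; exact hm
        simp [hm, hP]
      · have hP : lineP own ln = false := by rw [lineP_short _ _ hg]; simpa using hm
        simp only [hm, if_false, hP, ih]
        cases h : rest.findIdx? (lineP own) with
        | none => simp
        | some k =>
          simp only [Option.map_some]
          have : (↑(k + 1) : Int) = (k : Int) + 1 := by push_cast; ring
          simp [List.drop_succ_cons, this]
          ring_nf

-- lineP of Source B's flattened `others` list is the filtered any of the per-section lineP
theorem lineP_flatMap (prs : List (String × List String)) (key : String) (ln : String) :
    lineP ((prs.filter (fun kv => kv.1 != key)).flatMap (fun kv => kv.2)) ln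
      = (prs.filter (fun kv => kv.1 != key)).any (fun kv => lineP kv.2 ln) := by
  by_cases hg : 40 < PySem.Str.len (PySem.Str.stripChars (PySem.Str.lower ln) " :•·")
  · rw [lineP_long _ _ hg]
    symm
    simp only [List.any_eq_false]
    intro kv _
    simp [lineP_long kv.2 ln hg]
  · rw [lineP_short _ _ hg]
    rw [show pvMatches (PySem.Str.stripChars (PySem.Str.lower ln) " :•·")
        ((prs.filter (fun kv => kv.1 != key)).flatMap (fun kv => kv.2))
        = (prs.filter (fun kv => kv.1 != key)).any
            (fun kv => pvMatches (PySem.Str.stripChars (PySem.Str.lower ln) " :•·") kv.2) from by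
      simp [pvMatches, List.any_flatMap]]
    refine congrArg _ (funext fun kv => ?_)
    rw [lineP_short _ _ hg]

-- ===== VERDICT (by name: the statement is the Claim_ definition above) =====
theorem get_section_range_spec : Claim_equal_get_section_range := by
  intro lines section_key _
  unfold Spec_get_section_range get_section_range get_section_range_alt
  rw [bGo_none, find_section, findSectionGo_eq]
  cases h : lines.findIdx? (lineP (pvKeywords.getD section_key [])) with
  | none => simp
  | some s =>
    have hs : s < lines.length := (List.findIdx?_eq_some_iff_findIdx_eq.mp h).1
    simp only [zero_add]
    rw [if_neg (by omega : ¬ ((s : Int) = -1))]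
    rw [bGo_some]
    have hslice : PySem.List.slice lines (some ((s : Int) + 1)) none = lines.drop (s + 1) := by
      have : ((s : Int) + 1) = ((s + 1 : Nat) : Int) := by push_cast; ring
      rw [this, PySem.List.slice_some_none]
      unfold PySem.List.clampIdx
      split_ifs <;> first | omega | (congr 1; omega)
    set sub := lines.drop (s + 1) with hsub
    have hlen : (PySem.List.len lines : Int) = ((s : Int) + 1) + (sub.length : Int) := by
      simp [PySem.List.len_eq, hsub]
      omega
    have hfold := foldA_eq sub ((s : Int) + 1) section_key pvKeywords.items sub.length (le_refl _)
    rw [hslice]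
    rw [show (PySem.List.len lines) = ((s : Int) + 1) + ((sub.length : Nat) : Int) from hlen]
    rw [hfold]
    have hQ : (lineP ((pvKeywords.items.filter (fun kv => kv.1 != section_key)).flatMap (fun kv => kv.2)))
        = (fun ln => (pvKeywords.items.filter (fun kv => kv.1 != section_key)).any (fun kv => lineP kv.2 ln)) := by
      funext ln; exact lineP_flatMap _ _ _
    rw [hQ]
    have hle := gIdx_le sub (fun ln => (pvKeywords.items.filter (fun kv => kv.1 != section_key)).any (fun kv => lineP kv.2 ln))
    cases hq : sub.findIdx? (fun ln => (pvKeywords.items.filter (fun kv => kv.1 != section_key)).any (fun kv => lineP kv.2 ln)) with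
    | none =>
      have hgl : gIdx sub (fun ln => (pvKeywords.items.filter (fun kv => kv.1 != section_key)).any (fun kv => lineP kv.2 ln)) = sub.length := by
        unfold gIdx; rw [hq]; rfl
      rw [hgl, Nat.min_self]
    | some j =>
      have hgl : gIdx sub (fun ln => (pvKeywords.items.filter (fun kv => kv.1 != section_key)).any (fun kv => lineP kv.2 ln)) = j := by
        unfold gIdx; rw [hq]; rfl
      have hj : j < sub.length := (List.findIdx?_eq_some_iff_findIdx_eq.mp hq).1
      rw [hgl, Nat.min_eq_right (le_of_lt hj)]
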